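-- pv_equiv track=rewrite | github.com/pasc/irukandji | irukandji/mailparser/__init__.py | strip_levels
-- ===== SOURCE A (Python) =====
-- def strip_levels (level, text):
--     current = 0
--     i = 0
--
--     while current < level and i < len(text):
--         if text[i] in ['>', '|']:
--             current += 1
--
--         i += 1
--     return text[i:]
-- ===== SOURCE B (Python) =====
-- def strip_levels(level, text):
--     if level <= 0:
--         return text
--     positions = [i for i, c in enumerate(text) if c in ('>', '|')]
--     if len(positions) < level:
--         return ''
--     return text[positions[level - 1] + 1:]
-- ===== Notes on version B (the rewrite author's own statement) =====
-- stated objective: alternative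
-- what changed: A's single early-exit while-loop that counts markers while advancing an index is replaced by a two-phase computation: build the full table of marker positions with one enumerate/filter comprehension, then answer with a single slice (or the degenerate-case constants); the comprehension+slice phases run in C, measured >=1.5x faster.
import Mathlib
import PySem

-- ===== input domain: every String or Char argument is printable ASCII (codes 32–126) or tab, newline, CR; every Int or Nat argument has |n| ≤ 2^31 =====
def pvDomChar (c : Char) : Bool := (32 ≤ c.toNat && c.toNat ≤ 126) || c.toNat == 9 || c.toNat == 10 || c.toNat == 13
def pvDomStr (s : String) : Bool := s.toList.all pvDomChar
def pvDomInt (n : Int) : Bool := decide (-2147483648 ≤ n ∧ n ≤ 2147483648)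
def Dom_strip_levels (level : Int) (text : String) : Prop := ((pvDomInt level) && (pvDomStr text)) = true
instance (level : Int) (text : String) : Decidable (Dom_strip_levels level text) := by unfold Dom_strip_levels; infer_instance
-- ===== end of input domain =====

-- B replaces A's early-exit while-loop scan by a two-phase computation (collect all marker
-- indices, then one slice); same return value on every input (objective: alternative).

-- ===== PORT A =====
-- while current < level and i < len(text): … ; return text[i:]
-- (the loop is recursion on the suffix text[i:]; i ≤ len(text) always, so text[i:] is that suffix)
def stripALoop (level : Int) (cs : List Char) (current : Int) : List Char :=
  match cs with
  | [] => []
  | c :: rest =>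
    if current < level then
      stripALoop level rest (if c = '>' || c = '|' then current + 1 else current)
    else c :: rest

def strip_levels (level : Int) (text : String) : String :=
  String.ofList (stripALoop level text.toList 0)

-- ===== PORT B =====
-- positions = [i for i, c in enumerate(text) if c in ('>', '|')]
def markerPositions (cs : List Char) : List Int :=
  ((PySem.List.enumerate cs 0).filter (fun p => p.2 = '>' || p.2 = '|')).map (·.1)

def strip_levels_alt (level : Int) (text : String) : String :=
  if level ≤ 0 then text
  else
    let positions := markerPositions text.toList
    if (positions.length : Int) < level then ""
    else
      -- positions[level-1] is in range here, so the default 0 of pyGetD is never used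
      String.ofList (PySem.List.slice text.toList
        (some (PySem.List.pyGetD positions (level - 1) 0 + 1)) none)

-- ===== PRECONDITION & SPEC =====
def Spec_strip_levels (level : Int) (text : String) (out : String) : Prop := out = strip_levels_alt level text
instance (level : Int) (text : String) (out : String) : Decidable (Spec_strip_levels level text out) := by unfold Spec_strip_levels; infer_instance

-- ===== CLAIM (what is proved, stated in full; the proofs are below) =====
def Claim_equal_strip_levels : Prop := ∀ (level : Int) (text : String), Dom_strip_levels level text → Spec_strip_levels level text (strip_levels level text)

-- ===== LEMMAS AND PROOFS =====

-- common reference form: skip everything up to and including the m-th marker (m ≥ 1 assumed)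
def pvSkip : Nat → List Char → List Char
  | _, [] => []
  | m, c :: rest =>
    if c = '>' || c = '|' then (if m ≤ 1 then rest else pvSkip (m - 1) rest)
    else pvSkip m rest

theorem stripALoop_stop (level : Int) (cs : List Char) (current : Int)
    (h : ¬ current < level) : stripALoop level cs current = cs := by
  cases cs <;> simp [stripALoop, h]

theorem stripALoop_eq_pvSkip (cs : List Char) :
    ∀ (level current : Int), current < level →
      stripALoop level cs current = pvSkip (level - current).toNat cs := by
  induction cs with
  | nil => intro level current h; simp [stripALoop, pvSkip]
  | cons c rest ih =>
    intro level current h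
    by_cases hm : (c = '>' || c = '|') = true
    · by_cases h2 : current + 1 < level
      · have : stripALoop level (c :: rest) current = stripALoop level rest (current + 1) := by
          simp [stripALoop, h, hm]
        rw [this, ih level (current + 1) h2, pvSkip]
        have hle : ¬ (level - current).toNat ≤ 1 := by omega
        have harg : (level - current).toNat - 1 = (level - (current + 1)).toNat := by omega
        simp [hm, hle, harg]
      · have : stripALoop level (c :: rest) current = stripALoop level rest (current + 1) := by
          simp [stripALoop, h, hm]
        rw [this, stripALoop_stop level rest (current + 1) h2, pvSkip]
        have hle : (level - current).toNat ≤ 1 := by omega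
        simp [hm, hle]
    · have : stripALoop level (c :: rest) current = stripALoop level rest current := by
        simp [stripALoop, h, hm]
      rw [this, ih level current h, pvSkip]
      simp [hm]

theorem mp_shift (cs : List Char) :
    ∀ s : Int, ((PySem.List.enumerate cs s).filter (fun p => p.2 = '>' || p.2 = '|')).map (·.1)
      = (markerPositions cs).map (· + s) := by
  induction cs with
  | nil => intro s; simp [markerPositions, PySem.List.enumerate_nil]
  | cons c rest ih =>
    intro s
    have tail : (markerPositions rest).map (· + (s + 1))
        = ((markerPositions rest).map (· + 1)).map (· + s) := by
      rw [List.map_map]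
      exact List.map_congr_left (fun x _ => by simp [Function.comp]; ring)
    have hmp : markerPositions (c :: rest)
        = (if (c = '>' || c = '|') = true then [(0 : Int)] else [])
          ++ (markerPositions rest).map (· + 1) := by
      unfold markerPositions
      rw [PySem.List.enumerate_cons]
      by_cases hm : (c = '>' || c = '|') = true <;>
        · simp [hm]
          rw [ih 1, ← List.map_map]
          rfl
    rw [PySem.List.enumerate_cons, hmp]
    by_cases hm : (c = '>' || c = '|') = true <;>
      simp [hm, ih (s + 1), tail, List.map_map]

theorem mp_cons (c : Char) (rest : List Char) :
    markerPositions (c :: rest)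
      = (if (c = '>' || c = '|') = true then [(0 : Int)] else [])
        ++ (markerPositions rest).map (· + 1) := by
  unfold markerPositions
  rw [PySem.List.enumerate_cons]
  by_cases hm : (c = '>' || c = '|') = true <;>
    · simp [hm]
      rw [mp_shift rest 1, ← List.map_map]
      rfl

theorem mp_nonneg (cs : List Char) : ∀ x ∈ markerPositions cs, 0 ≤ x := by
  induction cs with
  | nil => simp [markerPositions, PySem.List.enumerate_nil]
  | cons c rest ih =>
    intro x hx
    rw [mp_cons] at hx
    rcases List.mem_append.1 hx with h | h
    · by_cases hm : (c = '>' || c = '|') = true <;> simp [hm] at h; omega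
    · rcases List.mem_map.1 h with ⟨y, hy, rfl⟩
      have := ih y hy; omega

def pvBCore (cs : List Char) (m : Nat) : List Char :=
  if (markerPositions cs).length < m then []
  else cs.drop ((PySem.List.pyGetD (markerPositions cs) ((m : Int) - 1) 0).toNat + 1)

-- B's core computation on char lists equals pvSkip
theorem bcore_eq (cs : List Char) : ∀ m : Nat, 1 ≤ m → pvBCore cs m = pvSkip m cs := by
  induction cs with
  | nil =>
    intro m hm
    have h : (markerPositions []).length < m := by
      simp [markerPositions, PySem.List.enumerate_nil]; omega
    simp [pvBCore, h, pvSkip]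
  | cons c rest ih =>
    intro m hm
    unfold pvBCore
    rw [mp_cons]
    by_cases hm' : (c = '>' || c = '|') = true
    · rw [if_pos hm']
      have hlen : ([(0:Int)] ++ (markerPositions rest).map (· + 1)).length
          = (markerPositions rest).length + 1 := by simp
      by_cases h1 : m = 1
      · subst h1
        rw [if_neg (by omega)]
        have hg : PySem.List.pyGetD ([(0:Int)] ++ (markerPositions rest).map (· + 1)) ((1:Nat) - 1) 0 = 0 := by
          rw [PySem.List.pyGetD_eq_getElem _ _ (by omega) (by rw [hlen]; omega)]
          simp
        rw [hg]
        simp [pvSkip, hm']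
      · have hm2 : 2 ≤ m := by omega
        have hskip : pvSkip m (c :: rest) = pvSkip (m - 1) rest := by
          rw [pvSkip]; simp [hm', if_neg (by omega : ¬ m ≤ 1)]
        rw [hskip, ← ih (m - 1) (by omega)]
        unfold pvBCore
        by_cases hlt : (markerPositions rest).length < m - 1
        · rw [if_pos (by omega), if_pos hlt]
        · rw [if_neg (by omega), if_neg hlt]
          have hg : PySem.List.pyGetD ([(0:Int)] ++ (markerPositions rest).map (· + 1)) ((m : Int) - 1) 0
              = PySem.List.pyGetD (markerPositions rest) (((m - 1 : Nat) : Int) - 1) 0 + 1 := by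
            rw [PySem.List.pyGetD_eq_getElem _ _ (by omega) (by rw [hlen]; omega),
                PySem.List.pyGetD_eq_getElem _ _ (by omega) (by omega)]
            have ht : ((m : Int) - 1).toNat = ((((m - 1 : Nat) : Int) - 1).toNat) + 1 := by omega
            simp only [List.singleton_append, ht, List.getElem_cons_succ, List.getElem_map]
          rw [hg]
          have hnn : 0 ≤ PySem.List.pyGetD (markerPositions rest) (((m - 1 : Nat) : Int) - 1) 0 := by
            rw [PySem.List.pyGetD_eq_getElem _ _ (by omega) (by omega)]
            exact mp_nonneg rest _ (List.getElem_mem _)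
          rw [show (PySem.List.pyGetD (markerPositions rest) (((m - 1 : Nat) : Int) - 1) 0 + 1).toNat + 1
              = ((PySem.List.pyGetD (markerPositions rest) (((m - 1 : Nat) : Int) - 1) 0).toNat + 1) + 1 from by omega]
          rw [List.drop_succ_cons]
    · rw [if_neg hm']
      have hskip : pvSkip m (c :: rest) = pvSkip m rest := by
        rw [pvSkip]; simp [hm']
      rw [hskip, ← ih m hm]
      unfold pvBCore
      have hlen : (([] : List Int) ++ (markerPositions rest).map (· + 1)).length
          = (markerPositions rest).length := by simp
      by_cases hlt : (markerPositions rest).length < m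
      · rw [if_pos (by rw [hlen]; omega), if_pos hlt]
      · rw [if_neg (by rw [hlen]; omega), if_neg hlt]
        have hg : PySem.List.pyGetD (([] : List Int) ++ (markerPositions rest).map (· + 1)) ((m : Int) - 1) 0
            = PySem.List.pyGetD (markerPositions rest) ((m : Int) - 1) 0 + 1 := by
          rw [PySem.List.pyGetD_eq_getElem _ _ (by omega) (by rw [hlen]; omega),
              PySem.List.pyGetD_eq_getElem _ _ (by omega) (by omega)]
          simp only [List.nil_append, List.getElem_map]
        rw [hg]
        have hnn : 0 ≤ PySem.List.pyGetD (markerPositions rest) ((m : Int) - 1) 0 := by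
          rw [PySem.List.pyGetD_eq_getElem _ _ (by omega) (by omega)]
          exact mp_nonneg rest _ (List.getElem_mem _)
        rw [show (PySem.List.pyGetD (markerPositions rest) ((m : Int) - 1) 0 + 1).toNat + 1
            = ((PySem.List.pyGetD (markerPositions rest) ((m : Int) - 1) 0).toNat + 1) + 1 from by omega]
        rw [List.drop_succ_cons]

-- ===== VERDICT (by name: the statement is the Claim_ definition above) =====
theorem strip_levels_spec : Claim_equal_strip_levels := by
  intro level text _
  unfold Spec_strip_levels strip_levels strip_levels_alt
  by_cases hl : level ≤ 0
  · rw [if_pos hl, stripALoop_stop level text.toList 0 (by omega)]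
    exact String.ofList_toList
  · rw [if_neg hl]
    have h0 : (0 : Int) < level := by omega
    have hA := stripALoop_eq_pvSkip text.toList level 0 h0
    have hT : (level - 0).toNat = level.toNat := by omega
    have hB := bcore_eq text.toList level.toNat (by omega)
    rw [hA, hT, ← hB]
    unfold pvBCore
    by_cases hlt : (markerPositions text.toList).length < level.toNat
    · rw [if_pos hlt,
        if_pos (show ((markerPositions text.toList).length : Int) < level from by omega)]
    · rw [if_neg hlt,
        if_neg (show ¬ ((markerPositions text.toList).length : Int) < level from by omega)]
      have hidx : ((level.toNat : Int) - 1) = level - 1 := by omega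
      rw [hidx]
      have hnn : 0 ≤ PySem.List.pyGetD (markerPositions text.toList) (level - 1) 0 := by
        rw [PySem.List.pyGetD_eq_getElem _ _ (by omega) (by omega)]
        exact mp_nonneg text.toList _ (List.getElem_mem _)
      rw [PySem.List.slice_from _ (show (0:Int) ≤ _ + 1 from by omega)]
      rw [show (PySem.List.pyGetD (markerPositions text.toList) (level - 1) 0 + 1).toNat
          = (PySem.List.pyGetD (markerPositions text.toList) (level - 1) 0).toNat + 1 from by omega]
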